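-- pv_equiv track=rewrite | github.com/ARezaAbdi/Deep-Reinforcement-Learning-AlphaGo-Zero-for-LCS | DRL(AlphaGo Zero) for LCS.py | end
-- ===== SOURCE A (Python) =====
-- def end(state, alphabet):
--   pos_act=[]
--   for i in range(len(alphabet)):
--     counter = 0
--     for j in range(len(state)):
--       x = state[j].find(alphabet[i])
--       if x >= 0:
--         x = True
--       if x < 0:
--         x = False
--       if x == True:
--         counter = counter + 1
--     if counter == len(state):
--       pos_act.append(alphabet[i])
--   if len(pos_act) == 0:
--     return False
--   return True
-- ===== SOURCE B (Python) =====
-- def end(state, alphabet):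
--     common = set(alphabet)
--     for s in state:
--         common &= set(s)
--     return bool(common)
-- ===== Notes on version B (the rewrite author's own statement) =====
-- stated objective: faster
-- what changed: Replaces the alphabet-by-string double loop with substring search by one pass that intersects per-string character sets starting from the alphabet's char set, then tests non-emptiness.
import Mathlib
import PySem

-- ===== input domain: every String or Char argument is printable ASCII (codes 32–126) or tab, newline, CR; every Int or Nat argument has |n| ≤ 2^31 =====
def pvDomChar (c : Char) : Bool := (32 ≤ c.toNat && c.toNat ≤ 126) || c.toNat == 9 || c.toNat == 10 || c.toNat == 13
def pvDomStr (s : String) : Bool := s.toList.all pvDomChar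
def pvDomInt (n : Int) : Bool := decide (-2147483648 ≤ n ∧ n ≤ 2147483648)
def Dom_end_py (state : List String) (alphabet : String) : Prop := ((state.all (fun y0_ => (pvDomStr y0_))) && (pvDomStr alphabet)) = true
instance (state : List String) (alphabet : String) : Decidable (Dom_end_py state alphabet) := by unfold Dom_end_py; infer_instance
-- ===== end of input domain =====

-- B replaces A's alphabet×state double loop of substring searches by one pass intersecting per-string character sets (objective: faster).

-- ===== PORT A =====
-- A: for each alphabet char count, over all state strings, those with find ≥ 0 (the x=True/x=False
-- reclassification collapses to that test); append the char when the count equals len(state);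
-- return whether the collected list is non-empty.
def end_py (state : List String) (alphabet : String) : Bool :=
  let pos_act : List Char :=
    (PySem.List.pyRange 0 (PySem.Str.len alphabet) 1).foldl (fun pos_act i =>
      let counter : Int :=
        (PySem.List.pyRange 0 (PySem.List.len state) 1).foldl (fun counter j =>
          let x := PySem.Chars.find (PySem.List.pyGetD state j "").toList
                     [PySem.List.pyGetD alphabet.toList i ' ']
          if 0 ≤ x then counter + 1 else counter) 0
      if counter = PySem.List.len state then pos_act ++ [PySem.List.pyGetD alphabet.toList i ' ']
      else pos_act) []
  if pos_act.length = 0 then false else true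

-- ===== PORT B =====
def end_py_alt (state : List String) (alphabet : String) : Bool :=
  let common : PySem.Set Char :=
    state.foldl (fun common s => PySem.Set.inter common (PySem.Set.ofList s.toList))
      (PySem.Set.ofList alphabet.toList)
  !common.isEmpty

-- ===== PRECONDITION & SPEC =====
def Spec_end_py (state : List String) (alphabet : String) (out : Bool) : Prop := out = end_py_alt state alphabet
instance (state : List String) (alphabet : String) (out : Bool) : Decidable (Spec_end_py state alphabet out) := by unfold Spec_end_py; infer_instance

-- ===== CLAIM (what is proved, stated in full; the proofs are below) =====
def Claim_equal_end_py : Prop := ∀ (state : List String) (alphabet : String), Dom_end_py state alphabet → Spec_end_py state alphabet (end_py state alphabet)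

-- ===== LEMMAS AND PROOFS =====

-- "c occurs in every string of state"
def pvAll (state : List String) (c : Char) : Bool := state.all (fun s => s.toList.contains c)

-- a single char is an infix iff it is a member
theorem pv_singleton_infix_iff {c : Char} {l : List Char} : [c] <:+: l ↔ c ∈ l := by
  constructor
  · intro h
    exact h.subset (List.mem_singleton_self c)
  · intro h
    obtain ⟨s, t, rfl⟩ := List.append_of_mem h
    exact ⟨s, t, by simp⟩

theorem pv_filter_isEmpty (l : List Char) (p : Char → Bool) :
    (l.filter p).isEmpty = !l.any p := by
  rcases h : l.any p with _|_
  · simp [List.filter_eq_nil_iff]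
    intro a ha; have := List.any_eq_false.mp h a ha; simp [this]
  · obtain ⟨a, ha, hp⟩ := List.any_eq_true.mp h
    simp [List.filter_eq_nil_iff]
    exact ⟨a, ha, by simp [hp]⟩

theorem pv_any_ofList (l : List Char) (p : Char → Bool) :
    (PySem.Set.ofList l).any p = l.any p := by
  rcases h : l.any p with _|_
  · rw [List.any_eq_false] at h ⊢
    intro a ha; exact h a ((PySem.Set.mem_ofList l a).mp ha)
  · obtain ⟨a, ha, hp⟩ := List.any_eq_true.mp h
    exact List.any_eq_true.mpr ⟨a, (PySem.Set.mem_ofList l a).mpr ha, hp⟩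

-- A's inner loop counts the strings containing c
theorem pv_inner (state : List String) (c : Char) :
    (PySem.List.pyRange 0 (PySem.List.len state) 1).foldl (fun counter j =>
        if 0 ≤ PySem.Chars.find (PySem.List.pyGetD state j "").toList [c] then counter + 1
        else counter) (0:Int)
      = ((state.countP (fun s => s.toList.contains c) : Nat) : Int) := by
  rw [PySem.List.foldl_pyRange_zero_pyGetD state ""
      (fun counter s => if 0 ≤ PySem.Chars.find s.toList [c] then counter + 1 else counter) 0]
  have hstep : List.foldl (fun counter s =>
        if 0 ≤ PySem.Chars.find s.toList [c] then counter + 1 else counter) (0:Int) state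
      = List.foldl (fun counter s =>
        if s.toList.contains c = true then counter + 1 else counter) (0:Int) state := by
    apply PySem.List.foldl_congr_mem
    intro b s _
    by_cases h : c ∈ s.toList
    · rw [if_pos ((PySem.Chars.find_nonneg_iff _ _).mpr (pv_singleton_infix_iff.mpr h)),
          if_pos (by simpa using h)]
    · rw [if_neg (fun hx => h (pv_singleton_infix_iff.mp ((PySem.Chars.find_nonneg_iff _ _).mp hx))),
          if_neg (by simpa using h)]
  rw [hstep, PySem.List.foldl_count_if (fun s : String => s.toList.contains c) state 0]
  simp

-- A returns whether some alphabet character occurs in every string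
theorem pv_a_char (state : List String) (alphabet : String) :
    end_py state alphabet = alphabet.toList.any (pvAll state) := by
  unfold end_py
  simp only [pv_inner]
  rw [show (fun (pos_act : List Char) (i : Int) =>
        if ((state.countP (fun s => s.toList.contains (PySem.List.pyGetD alphabet.toList i ' ')) : Nat) : Int)
            = PySem.List.len state
        then pos_act ++ [PySem.List.pyGetD alphabet.toList i ' '] else pos_act)
      = (fun pos_act i =>
        if (fun i : Int => decide (((state.countP (fun s => s.toList.contains (PySem.List.pyGetD alphabet.toList i ' ')) : Nat) : Int)
            = PySem.List.len state)) i = true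
        then pos_act ++ [(fun i : Int => PySem.List.pyGetD alphabet.toList i ' ') i] else pos_act)
      from by funext pos_act i; simp]
  rw [PySem.List.foldl_append_if]
  simp only [List.nil_append, List.length_map, List.length_eq_zero_iff, List.filter_eq_nil_iff]
  rcases h : alphabet.toList.any (pvAll state) with _|_
  · rw [if_pos]
    intro i hi
    simp only [PySem.Str.len_eq, PySem.List.mem_pyRange_one] at hi
    obtain ⟨h0, hlt⟩ := hi
    lift i to Nat using h0
    have hik : i < alphabet.toList.length := by exact_mod_cast hlt
    have hmem : alphabet.toList.getD i ' ' ∈ alphabet.toList := by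
      rw [List.getD_eq_getElem _ _ hik]; exact List.getElem_mem hik
    have := List.any_eq_false.mp h _ hmem
    simp only [PySem.List.pyGetD_natCast, decide_eq_true_eq, PySem.List.len]
    intro hcnt
    have hcnt' : state.countP (fun s => s.toList.contains (alphabet.toList.getD i ' ')) = state.length := by
      exact_mod_cast hcnt
    have hall := List.countP_eq_length.mp hcnt'
    exact absurd (List.all_eq_true.mpr hall) (by simpa [pvAll] using this)
  · rw [if_neg]
    obtain ⟨c, hc, hp⟩ := List.any_eq_true.mp h
    obtain ⟨k, hk, rfl⟩ := List.mem_iff_getElem.mp hc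
    intro hnone
    have hmemr : ((k : Int)) ∈ PySem.List.pyRange 0 (PySem.Str.len alphabet) 1 := by
      simp only [PySem.Str.len_eq, PySem.List.mem_pyRange_one]
      exact ⟨by positivity, by exact_mod_cast hk⟩
    have := hnone _ hmemr
    simp only [PySem.List.pyGetD_natCast, List.getD_eq_getElem _ _ hk, decide_eq_true_eq,
      PySem.List.len] at this
    apply this
    have hall : state.countP (fun s => s.toList.contains (alphabet.toList[k])) = state.length :=
      List.countP_eq_length.mpr (List.all_eq_true.mp (by simpa [pvAll] using hp))
    exact_mod_cast hall

-- B's intersection fold filters the initial set by membership in every string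
theorem pv_b_fold (state : List String) :
    ∀ init : List Char,
      state.foldl (fun common s => PySem.Set.inter common (PySem.Set.ofList s.toList)) init
        = init.filter (pvAll state) := by
  induction state with
  | nil =>
    intro init
    rw [show pvAll [] = fun _ => true from by funext c; simp [pvAll]]
    simp
  | cons s t ih =>
    intro init
    rw [List.foldl_cons, ih]
    show (init.filter (fun c => (PySem.Set.ofList s.toList).contains c)).filter (pvAll t)
        = init.filter (pvAll (s :: t))
    rw [List.filter_filter]
    apply List.filter_congr
    intro c _
    simp [pvAll, Bool.and_comm]

theorem pv_b_char (state : List String) (alphabet : String) :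
    end_py_alt state alphabet = alphabet.toList.any (pvAll state) := by
  unfold end_py_alt
  rw [pv_b_fold state (PySem.Set.ofList alphabet.toList)]
  show (!(List.filter (pvAll state) (PySem.Set.ofList alphabet.toList)).isEmpty)
      = alphabet.toList.any (pvAll state)
  rw [pv_filter_isEmpty, Bool.not_not, pv_any_ofList]

-- ===== VERDICT (by name: the statement is the Claim_ definition above) =====
theorem end_py_spec : Claim_equal_end_py := by
  intro state alphabet _
  show end_py state alphabet = end_py_alt state alphabet
  rw [pv_a_char, pv_b_char]
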